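-- pv_equiv track=rewrite | github.com/AjaySreekumar47/scalable-question-generation | Final Python code/sota_mcq_pipeline.py | sliding_window_from_sentences
-- ===== SOURCE A (Python) =====
-- from typing import List, Dict, Any, Optional, Tuple
--
-- def sliding_window_from_sentences(sentences: List[str], chunk_words: int, stride_words: int) -> List[str]:
--     words = []
--     for s in sentences:
--         words.extend(s.split())
--     out = []
--     start = 0
--     N = len(words)
--     while start < N:
--         end = min(start + chunk_words, N)
--         out.append(" ".join(words[start:end]))
--         if end >= N:
--             break
--         start += max(1, (chunk_words - stride_words))
--     return out
-- ===== SOURCE B (Python) =====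
-- def sliding_window_from_sentences(sentences, chunk_words, stride_words):
--     words = [w for s in sentences for w in s.split()]
--     step = max(1, chunk_words - stride_words)
--     out = []
--     while len(words) > chunk_words:
--         out.append(" ".join(words[:chunk_words]))
--         words = words[step:]
--     if words:
--         out.append(" ".join(words))
--     return out
-- ===== Notes on version B (the rewrite author's own statement) =====
-- stated objective: simpler
-- what changed: B drops A's index arithmetic (start, N, min-clamped end, in-loop break): it repeatedly takes the chunk-sized prefix of the remaining word list and drops step words, emitting the final short remainder after the loop; Pre_ excludes negative chunk_words, where A returns accidental from-the-end slices (negative slice index) and B's natural loop does not terminate.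
-- outside the precondition, e.g. on sliding_window_from_sentences(['a b'], -1, 0): A returns ['a', ''], B does not finish within the time limit
import Mathlib
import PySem

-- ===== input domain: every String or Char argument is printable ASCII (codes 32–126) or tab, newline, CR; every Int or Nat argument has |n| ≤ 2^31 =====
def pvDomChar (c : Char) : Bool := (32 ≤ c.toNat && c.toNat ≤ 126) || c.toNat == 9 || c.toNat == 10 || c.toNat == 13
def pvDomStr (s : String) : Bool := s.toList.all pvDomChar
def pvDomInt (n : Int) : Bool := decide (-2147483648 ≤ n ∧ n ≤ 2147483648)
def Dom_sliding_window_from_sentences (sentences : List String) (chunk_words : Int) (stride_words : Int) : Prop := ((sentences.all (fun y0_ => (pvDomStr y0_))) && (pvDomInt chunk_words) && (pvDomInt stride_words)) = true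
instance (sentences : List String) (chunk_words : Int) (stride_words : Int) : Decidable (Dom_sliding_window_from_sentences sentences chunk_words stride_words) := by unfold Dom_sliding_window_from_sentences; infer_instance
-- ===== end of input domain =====

-- B replaces A's index bookkeeping (start, N, min-clamped end, in-loop break) by consuming the
-- word list itself: take the chunk-sized prefix, drop step words, and emit the short remainder
-- after the loop (objective: simpler).

-- ===== PORT A =====
-- A's while loop: append words[start:end] with end = min(start+chunk, N); break once end ≥ N,
-- else advance start by max(1, chunk_words - stride_words). The fuel argument only bounds the
-- iteration count to make the recursion structural; with fuel = words.length + 1 it never runs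
-- out while start < len(words), since each iteration advances start by ≥ 1.
def pvALoop (words : List String) (chunk_words stride_words : Int) : Nat → Int → List String → List String
  | 0, _, out => out
  | fuel + 1, start, out =>
    if start < (words.length : Int) then
      if min (start + chunk_words) (words.length : Int) ≥ (words.length : Int) then
        out ++ [PySem.Str.join " " (PySem.List.slice words (some start) (some (min (start + chunk_words) (words.length : Int))))]
      else
        pvALoop words chunk_words stride_words fuel (start + max 1 (chunk_words - stride_words))
          (out ++ [PySem.Str.join " " (PySem.List.slice words (some start) (some (min (start + chunk_words) (words.length : Int))))])
    else out

def sliding_window_from_sentences (sentences : List String) (chunk_words : Int) (stride_words : Int) : List String :=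
  let words := sentences.foldl (fun ws s => ws ++ PySem.Str.split₀ s) []
  pvALoop words chunk_words stride_words (words.length + 1) 0 []

-- ===== PORT B =====
-- B's while loop: while more than chunk words remain, emit the chunk-sized prefix and drop step
-- words; afterwards emit the nonempty remainder. Fuel = words.length + 1 only makes the recursion
-- structural (each iteration drops ≥ 1 word whenever 0 ≤ chunk, i.e. inside Pre_).
def pvBLoop (chunk step : Int) : Nat → List String → List String → List String
  | 0, _, out => out
  | fuel + 1, ws, out =>
    if (ws.length : Int) > chunk then
      pvBLoop chunk step fuel (PySem.List.slice ws (some step) none)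
        (out ++ [PySem.Str.join " " (PySem.List.slice ws none (some chunk))])
    else if ws ≠ [] then out ++ [PySem.Str.join " " ws] else out

def sliding_window_from_sentences_alt (sentences : List String) (chunk_words : Int) (stride_words : Int) : List String :=
  let words := sentences.flatMap (fun s => PySem.Str.split₀ s)
  let step := max 1 (chunk_words - stride_words)
  pvBLoop chunk_words step (words.length + 1) words []

-- ===== PRECONDITION & SPEC =====
-- Pre_ excludes negative chunk_words: there A's window bound start+chunk_words becomes a negative
-- slice index and A returns accidental from-the-end slices, while B's natural loop does not
-- terminate.
def Pre_sliding_window_from_sentences (sentences : List String) (chunk_words : Int) (stride_words : Int) : Prop := 0 ≤ chunk_words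
instance (sentences : List String) (chunk_words : Int) (stride_words : Int) : Decidable (Pre_sliding_window_from_sentences sentences chunk_words stride_words) := by unfold Pre_sliding_window_from_sentences; infer_instance
def pvWitness_sliding_window_from_sentences : List String × Int × Int := (["a b c d e"], 2, 1)

def Spec_sliding_window_from_sentences (sentences : List String) (chunk_words : Int) (stride_words : Int) (out : List String) : Prop := out = sliding_window_from_sentences_alt sentences chunk_words stride_words
instance (sentences : List String) (chunk_words : Int) (stride_words : Int) (out : List String) : Decidable (Spec_sliding_window_from_sentences sentences chunk_words stride_words out) := by unfold Spec_sliding_window_from_sentences; infer_instance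

-- ===== CLAIM (what is proved, stated in full; the proofs are below) =====
def Claim_equal_sliding_window_from_sentences : Prop := ∀ (sentences : List String) (chunk_words : Int) (stride_words : Int), Dom_sliding_window_from_sentences sentences chunk_words stride_words → Pre_sliding_window_from_sentences sentences chunk_words stride_words → Spec_sliding_window_from_sentences sentences chunk_words stride_words (sliding_window_from_sentences sentences chunk_words stride_words)

-- ===== LEMMAS AND PROOFS =====

-- Loop correspondence: A's loop at index `start` equals B's loop on the suffix `words.drop start`,
-- with the same fuel and accumulator (needs 0 ≤ chunk).
lemma pv_loop_eq (words : List String) (c s : Int) (hc : 0 ≤ c) :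
    ∀ (fuel : Nat) (start : Nat) (out : List String),
      pvALoop words c s fuel (start : Int) out
        = pvBLoop c (max 1 (c - s)) fuel (words.drop start) out := by
  intro fuel
  induction fuel with
  | zero => intro start out; simp [pvALoop, pvBLoop]
  | succ fuel ih =>
    intro start out
    obtain ⟨cn, rfl⟩ := Int.eq_ofNat_of_zero_le hc
    obtain ⟨stepn, hstep⟩ : ∃ n : Nat, max 1 ((cn : Int) - s) = (n : Int) :=
      ⟨(max 1 ((cn : Int) - s)).toNat, by omega⟩
    have hstep1 : 1 ≤ stepn := by omega
    simp only [pvALoop, pvBLoop, hstep]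
    by_cases hin : (start : Int) < (words.length : Int)
    · rw [if_pos hin]
      have hlens : (words.drop start).length = words.length - start := List.length_drop
      by_cases hbr : min ((start : Int) + cn) (words.length : Int) ≥ (words.length : Int)
      · -- A breaks: the remainder fits in one chunk; B exits its loop and emits the remainder
        rw [if_pos hbr]
        have hmin : min ((start : Int) + cn) (words.length : Int) = (words.length : Int) := by omega
        have hgt : ¬ (((words.drop start).length : Int) > (cn : Int)) := by
          rw [hlens]; push_cast; omega
        rw [if_neg hgt]
        have hne : words.drop start ≠ [] := by
          intro h
          have := congrArg List.length h
          simp [hlens] at this; omega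
        rw [if_pos hne, hmin]
        have : PySem.List.slice words (some (start : Int)) (some ((words.length : Nat) : Int))
            = words.drop start := by
          rw [PySem.List.slice_natCast]
          exact List.take_of_length_le (by simp [hlens])
        rw [this]
      · -- A continues: emit words[start:start+chunk] = prefix of the suffix, advance by step
        rw [if_neg hbr]
        have hgt : ((words.drop start).length : Int) > (cn : Int) := by
          rw [hlens]; push_cast; omega
        rw [if_pos hgt]
        have hslice : PySem.List.slice words (some (start : Int)) (some (min ((start : Int) + cn) (words.length : Int)))
            = PySem.List.slice (words.drop start) none (some (cn : Int)) := by
          have hmin : min ((start : Int) + cn) (words.length : Int) = (start : Int) + cn := by omega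
          rw [hmin, PySem.List.slice_natCast_add, PySem.List.slice_to_natCast]
        have hdrop : PySem.List.slice (words.drop start) (some (stepn : Int)) none
            = words.drop (start + stepn) := by
          rw [PySem.List.slice_from_natCast, List.drop_drop, Nat.add_comm]
        have hadv : (start : Int) + (stepn : Int) = ((start + stepn : Nat) : Int) := by push_cast; ring
        rw [hslice, hadv, ih (start + stepn), hdrop, hstep]
    · -- start past the end: A's guard fails; B's suffix is empty
      rw [if_neg hin]
      have hnil : words.drop start = [] := List.drop_eq_nil_of_le (by omega)
      rw [hnil]
      have hgt : ¬ ((([] : List String).length : Int) > (cn : Int)) := by simp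
      rw [if_neg hgt, if_neg (by simp)]

-- ===== VERDICT (by name: the statement is the Claim_ definition above) =====
theorem sliding_window_from_sentences_spec : Claim_equal_sliding_window_from_sentences := by
  intro sentences c s _hdom hpre
  unfold Spec_sliding_window_from_sentences sliding_window_from_sentences sliding_window_from_sentences_alt
  have hwords : sentences.foldl (fun ws t => ws ++ PySem.Str.split₀ t) []
      = sentences.flatMap (fun t => PySem.Str.split₀ t) := by
    simpa using PySem.List.foldl_append_eq_flatMap (g := fun t => PySem.Str.split₀ t) (l := sentences) (acc := [])
  simp only [hwords]
  have h0 := pv_loop_eq (sentences.flatMap (fun t => PySem.Str.split₀ t)) c s hpre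
    ((sentences.flatMap (fun t => PySem.Str.split₀ t)).length + 1) 0 []
  simpa using h0
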